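-- pv_equiv track=rewrite | github.com/mucahityalcinkaya/isaret-dili-rapor | api.py | make_confusion_symmetric
-- ===== SOURCE A (Python) =====
-- from typing import Dict, List, Tuple, Optional, Any
--
-- def make_confusion_symmetric(conf_map: Dict[str, List[str]]) -> Dict[str, List[str]]:
--     out = {k: list(dict.fromkeys(v)) for k, v in conf_map.items()}
--     for a, bs in conf_map.items():
--         for b in bs:
--             if b == a:
--                 continue
--             if b not in out:
--                 out[b] = [a]
--             else:
--                 if a not in out[b]:
--                     out[b].append(a)
--     for k in out:
--         out[k] = list(dict.fromkeys(out[k]))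
--     return out
-- ===== SOURCE B (Python) =====
-- def make_confusion_symmetric(conf_map):
--     keys = list(conf_map)
--     seen = set(keys)
--     extra = []
--     for a, bs in conf_map.items():
--         for b in bs:
--             if b != a and b not in seen:
--                 seen.add(b)
--                 extra.append(b)
--     rev = {}
--     for a, bs in conf_map.items():
--         for b in dict.fromkeys(bs):
--             if b != a:
--                 rev.setdefault(b, []).append(a)
--     return {k: list(dict.fromkeys(conf_map.get(k, []) + rev.get(k, []))) for k in keys + extra}
-- ===== Notes on version B (the rewrite author's own statement) =====
-- stated objective: faster
-- what changed: B replaces A's interleaved grow-and-check mutation of the output dict (create-or-append per edge with a linear 'a not in out[b]' list scan, then a final dedup pass) with an index-first-then-emit decomposition: one pass collects the output key order (original keys plus first-seen target-only nodes, via a hash set), one pass builds a reverse-adjacency index dict, and each output entry is then emitted independently as dedup(base list + reverse index lookup).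
import Mathlib
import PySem

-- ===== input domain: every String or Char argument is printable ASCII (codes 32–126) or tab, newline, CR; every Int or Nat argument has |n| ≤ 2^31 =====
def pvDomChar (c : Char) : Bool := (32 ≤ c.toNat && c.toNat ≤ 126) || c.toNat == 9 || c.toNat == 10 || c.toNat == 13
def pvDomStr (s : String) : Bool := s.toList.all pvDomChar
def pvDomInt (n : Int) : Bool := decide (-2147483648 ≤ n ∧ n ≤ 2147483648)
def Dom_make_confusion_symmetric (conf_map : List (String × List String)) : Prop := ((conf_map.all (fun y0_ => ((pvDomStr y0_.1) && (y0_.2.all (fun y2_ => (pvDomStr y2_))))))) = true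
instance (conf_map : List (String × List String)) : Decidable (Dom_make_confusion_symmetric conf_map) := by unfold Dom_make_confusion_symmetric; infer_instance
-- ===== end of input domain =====

-- B builds a reverse-adjacency index and the output key order first, then emits each entry independently
-- (dedup(base + reverse lookup)), instead of A's grow-and-check dict mutation with per-edge list scans;
-- objective: faster (hash set/dict lookups intended to replace A's per-edge list scans).

-- ===== PORT A =====
-- inner loop body of A's symmetrization pass: 'if b == a: continue; if b not in out: out[b] = [a]
-- elif a not in out[b]: out[b].append(a)'
def pvStepA (a : String) (out : PySem.Dict String (List String)) (b : String) :
    PySem.Dict String (List String) :=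
  if b = a then out
  else
    match out.get? b with
    | none => out.insert b [a]
    | some l => if a ∈ l then out else out.insert b (l ++ [a])

def make_confusion_symmetric (conf_map : List (String × List String)) : List (String × List String) :=
  -- out = {k: list(dict.fromkeys(v)) for k, v in conf_map.items()}
  let out0 : PySem.Dict String (List String) :=
    conf_map.foldl (fun d p => d.insert p.1 (PySem.List.dedup p.2)) PySem.Dict.empty
  -- for a, bs in conf_map.items(): for b in bs: …
  let out1 : PySem.Dict String (List String) :=
    conf_map.foldl (fun out p => p.2.foldl (pvStepA p.1) out) out0
  -- for k in out: out[k] = list(dict.fromkeys(out[k]))  — reassigns every key in place; a Dict's keys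
  -- are unique, so this is the map over its items
  out1.items.map (fun q => (q.1, PySem.List.dedup q.2))

-- ===== PORT B =====
def make_confusion_symmetric_alt (conf_map : List (String × List String)) : List (String × List String) :=
  -- keys = list(conf_map); seen = set(keys); extra = []
  let keys := conf_map.map Prod.fst
  -- for a, bs in conf_map.items(): for b in bs: if b != a and b not in seen: seen.add(b); extra.append(b)
  let se : PySem.Set String × List String :=
    conf_map.foldl
      (fun st p =>
        p.2.foldl
          (fun st b =>
            if b ≠ p.1 ∧ ¬ (PySem.Set.contains st.1 b) then (PySem.Set.add st.1 b, st.2 ++ [b])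
            else st)
          st)
      (PySem.Set.ofList keys, [])
  -- rev = {}; for a, bs in conf_map.items(): for b in dict.fromkeys(bs): if b != a: rev.setdefault(b, []).append(a)
  let rev : PySem.Dict String (List String) :=
    conf_map.foldl
      (fun d p =>
        (PySem.List.dedup p.2).foldl
          (fun d b => if b ≠ p.1 then d.modify b [] (· ++ [p.1]) else d) d)
      PySem.Dict.empty
  -- return {k: list(dict.fromkeys(conf_map.get(k, []) + rev.get(k, []))) for k in keys + extra}
  -- (all these keys are pairwise distinct on Pre_)
  (keys ++ se.2).map (fun k =>
    (k, PySem.List.dedup ((PySem.Dict.mk conf_map).getD k [] ++ rev.getD k [])))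

-- ===== PRECONDITION & SPEC =====
-- Pre_ excludes association lists with duplicate keys: those do not represent a Python dict
-- (A's parameter type), so no Python-reachable input is excluded.
def Pre_make_confusion_symmetric (conf_map : List (String × List String)) : Prop :=
  (conf_map.map Prod.fst).Nodup
instance (conf_map : List (String × List String)) : Decidable (Pre_make_confusion_symmetric conf_map) := by
  unfold Pre_make_confusion_symmetric; infer_instance

def pvWitness_make_confusion_symmetric : (List (String × List String)) :=
  [("a", ["b", "a", "b"]), ("b", ["c"])]

def Spec_make_confusion_symmetric (conf_map : List (String × List String)) (out : List (String × List String)) : Prop := out = make_confusion_symmetric_alt conf_map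
instance (conf_map : List (String × List String)) (out : List (String × List String)) : Decidable (Spec_make_confusion_symmetric conf_map out) := by unfold Spec_make_confusion_symmetric; infer_instance

-- ===== CLAIM (what is proved, stated in full; the proofs are below) =====
def Claim_equal_make_confusion_symmetric : Prop := ∀ (conf_map : List (String × List String)), Dom_make_confusion_symmetric conf_map → Pre_make_confusion_symmetric conf_map → Spec_make_confusion_symmetric conf_map (make_confusion_symmetric conf_map)

-- ===== LEMMAS AND PROOFS =====

-- functional description of one inner step of A on an entry already present:
-- append a to the value at k if this pair (a, bs) qualifies and a is absent
def pvUpd (a : String) (bs : List String) (p : String × List String) : String × List String :=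
  (p.1, if a ≠ p.1 ∧ p.1 ∈ bs ∧ a ∉ p.2 then p.2 ++ [a] else p.2)

-- the fresh entries one pair (a, bs) creates: first occurrences of targets not yet seen
def pvNews (a : String) : List String → List String → List (String × List String)
  | [], _ => []
  | b :: bs, seen =>
      if b ≠ a ∧ b ∉ seen then (b, [a]) :: pvNews a bs (seen ++ [b]) else pvNews a bs seen

-- one whole pair of A's pass, at the items level
def pvFitStep (out : List (String × List String)) (p : String × List String) :
    List (String × List String) :=
  out.map (pvUpd p.1 p.2) ++ pvNews p.1 p.2 (out.map Prod.fst)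

-- how a single value grows over the remaining pairs
def pvGrow (ps : List (String × List String)) (k : String) (l : List String) : List String :=
  ps.foldl (fun l p => if p.1 ≠ k ∧ k ∈ p.2 ∧ p.1 ∉ l then l ++ [p.1] else l) l

-- the ordered sources of k among ps
def pvSrc (ps : List (String × List String)) (k : String) : List String :=
  (ps.filter (fun p => decide (p.1 ≠ k ∧ k ∈ p.2))).map Prod.fst

-- the fresh entries of a whole pass, with their final (grown) values
def pvX : List (String × List String) → List String → List (String × List String)
  | [], _ => []
  | p :: ps, seen =>
      (pvNews p.1 p.2 seen).map (fun q => (q.1, pvGrow ps q.1 q.2)) ++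
        pvX ps (seen ++ (pvNews p.1 p.2 seen).map Prod.fst)

-- just the fresh keys of a whole pass
def pvEK : List (String × List String) → List String → List String
  | [], _ => []
  | p :: ps, seen =>
      (pvNews p.1 p.2 seen).map Prod.fst ++
        pvEK ps (seen ++ (pvNews p.1 p.2 seen).map Prod.fst)

lemma pvNews_mem (a : String) : ∀ (bs seen : List String) (q : String × List String),
    q ∈ pvNews a bs seen → q.2 = [a] ∧ q.1 ∈ bs ∧ q.1 ≠ a ∧ q.1 ∉ seen := by
  intro bs
  induction bs with
  | nil => intro seen q h; simp [pvNews] at h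
  | cons b bs ih =>
    intro seen q h
    by_cases hc : b ≠ a ∧ b ∉ seen
    · simp only [pvNews, if_pos hc] at h
      rcases List.mem_cons.mp h with h | h
      · subst h; exact ⟨rfl, by simp, hc.1, hc.2⟩
      · obtain ⟨h1, h2, h3, h4⟩ := ih _ _ h
        exact ⟨h1, by simp [h2], h3, fun hm => h4 (by simp [hm])⟩
    · simp only [pvNews, if_neg hc] at h
      obtain ⟨h1, h2, h3, h4⟩ := ih _ _ h
      exact ⟨h1, by simp [h2], h3, h4⟩

lemma pvNews_fst_not_mem (a : String) (bs seen : List String) (x : String)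
    (hx : x ∈ (pvNews a bs seen).map Prod.fst) : x ∉ seen := by
  simp only [List.mem_map] at hx
  obtain ⟨q, hq, rfl⟩ := hx
  exact (pvNews_mem a bs seen q hq).2.2.2

lemma pvNews_fst_nodup (a : String) : ∀ (bs seen : List String),
    ((pvNews a bs seen).map Prod.fst).Nodup := by
  intro bs
  induction bs with
  | nil => intro seen; simp [pvNews]
  | cons b bs ih =>
    intro seen
    by_cases hc : b ≠ a ∧ b ∉ seen
    · simp only [pvNews, if_pos hc, List.map_cons, List.nodup_cons]
      refine ⟨fun hb => ?_, ih _⟩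
      exact pvNews_fst_not_mem a bs (seen ++ [b]) b hb (by simp)
    · simpa only [pvNews, if_neg hc] using ih seen

lemma pvNews_covers (a : String) : ∀ (bs seen : List String) (b : String),
    b ∈ bs → b ≠ a → b ∈ seen ∨ b ∈ (pvNews a bs seen).map Prod.fst := by
  intro bs
  induction bs with
  | nil => intro seen b h; simp at h
  | cons b0 bs ih =>
    intro seen b hb hba
    by_cases hc : b0 ≠ a ∧ b0 ∉ seen
    · simp only [pvNews, if_pos hc, List.map_cons]
      rcases List.mem_cons.mp hb with rfl | hb
      · exact Or.inr (by simp)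
      · rcases ih (seen ++ [b0]) b hb hba with h | h
        · rcases List.mem_append.mp h with h | h
          · exact Or.inl h
          · simp at h; subst h; exact Or.inr (by simp)
        · exact Or.inr (by simp [h])
    · simp only [pvNews, if_neg hc]
      rcases List.mem_cons.mp hb with rfl | hb
      · exact Or.inl (not_not.mp (fun h => hc ⟨hba, h⟩))
      · exact ih seen b hb hba

lemma pvEK_not_mem_seen : ∀ (ps : List (String × List String)) (seen : List String) (x : String),
    x ∈ pvEK ps seen → x ∉ seen := by
  intro ps
  induction ps with
  | nil => intro seen x h; simp [pvEK] at h
  | cons p ps ih =>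
    intro seen x h
    simp only [pvEK, List.mem_append] at h
    rcases h with h | h
    · exact pvNews_fst_not_mem p.1 p.2 seen x h
    · intro hx
      exact ih _ x h (by simp [hx])

lemma pvUpd_cons_self (a : String) (bs : List String) : pvUpd a (a :: bs) = pvUpd a bs := by
  funext p
  by_cases hap : a = p.1
  · simp [pvUpd, hap]
  · simp only [pvUpd, List.mem_cons]
    have : (a ≠ p.1 ∧ (p.1 = a ∨ p.1 ∈ bs) ∧ a ∉ p.2) ↔ (a ≠ p.1 ∧ p.1 ∈ bs ∧ a ∉ p.2) := by
      constructor
      · rintro ⟨h1, h2 | h2, h3⟩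
        · exact absurd h2.symm h1
        · exact ⟨h1, h2, h3⟩
      · rintro ⟨h1, h2, h3⟩; exact ⟨h1, Or.inr h2, h3⟩
    simp only [this]

lemma pvUpd_cons_of_ne (a b : String) (bs : List String) (p : String × List String)
    (hpb : p.1 ≠ b) : pvUpd a (b :: bs) p = pvUpd a bs p := by
  simp only [pvUpd, List.mem_cons]
  have : (a ≠ p.1 ∧ (p.1 = b ∨ p.1 ∈ bs) ∧ a ∉ p.2) ↔ (a ≠ p.1 ∧ p.1 ∈ bs ∧ a ∉ p.2) := by
    constructor
    · rintro ⟨h1, h2 | h2, h3⟩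
      · exact absurd h2 hpb
      · exact ⟨h1, h2, h3⟩
    · rintro ⟨h1, h2, h3⟩; exact ⟨h1, Or.inr h2, h3⟩
  simp only [this]

-- the inner loop of A over one pair, described functionally at the items level
lemma pvA_inner (a : String) : ∀ (bs : List String) (d : PySem.Dict String (List String)),
    d.keys.Nodup →
    (bs.foldl (pvStepA a) d).items = d.items.map (pvUpd a bs) ++ pvNews a bs d.keys := by
  intro bs
  induction bs with
  | nil =>
    intro d _
    have : ∀ p : String × List String, p ∈ d.items → pvUpd a [] p = p := by
      intro p _; simp [pvUpd]
    simp [pvNews, List.map_congr_left this]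
  | cons b bs ih =>
    intro d hnd
    by_cases hba : b = a
    · subst hba
      simp only [List.foldl_cons, pvStepA, eq_self_iff_true, if_true, pvUpd_cons_self]
      have : pvNews b (b :: bs) d.keys = pvNews b bs d.keys := by
        simp [pvNews]
      rw [this, ih d hnd]
    · simp only [List.foldl_cons, pvStepA, if_neg hba]
      by_cases hcont : d.contains b = true
      · -- b already a key: get? d b = some l
        obtain ⟨l, hl⟩ : ∃ l, d.get? b = some l := by
          cases hget : d.get? b with
          | none => rw [(PySem.Dict.get?_eq_none_iff_contains d b).mp hget] at hcont; simp at hcont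
          | some l => exact ⟨l, rfl⟩
        have hbkeys : b ∈ d.keys := (PySem.Dict.contains_iff_mem_keys d b).mp hcont
        have hnews : pvNews a (b :: bs) d.keys = pvNews a bs d.keys := by
          simp only [pvNews]
          rw [if_neg (fun h => h.2 hbkeys)]
        have hval : ∀ p : String × List String, p ∈ d.items → p.1 = b → p.2 = l := by
          intro p hp hpb
          have := PySem.Dict.get?_of_mem_items d (k := p.1) (v := p.2) (by exact hp) hnd
          rw [hpb, hl] at this
          exact (Option.some_inj.mp this).symm
        rw [hl]
        by_cases hal : a ∈ l
        · simp only [if_pos hal]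
          rw [ih d hnd, hnews]
          congr 1
          apply List.map_congr_left
          intro p hp
          by_cases hpb : p.1 = b
          · have hp2 : p.2 = l := hval p hp hpb
            simp only [pvUpd, List.mem_cons]
            have h1 : ¬ (a ≠ p.1 ∧ p.1 ∈ bs ∧ a ∉ p.2) := by
              rintro ⟨_, _, h3⟩; exact h3 (hp2 ▸ hal)
            have h2 : ¬ (a ≠ p.1 ∧ (p.1 = b ∨ p.1 ∈ bs) ∧ a ∉ p.2) := by
              rintro ⟨_, _, h3⟩; exact h3 (hp2 ▸ hal)
            rw [if_neg h1, if_neg h2]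
          · exact (pvUpd_cons_of_ne a b bs p hpb).symm
        · simp only [if_neg hal]
          set d' := d.insert b (l ++ [a]) with hd'
          have hitems' : d'.items = d.items.map (fun p => if (p.1 == b) = true then (b, l ++ [a]) else p) :=
            PySem.Dict.items_insert_of_contains d _ hcont
          have hkeys' : d'.keys = d.keys := PySem.Dict.keys_insert_of_contains d _ hcont
          rw [ih d' (hkeys' ▸ hnd), hitems', hkeys', hnews, List.map_map]
          congr 1
          apply List.map_congr_left
          intro p hp
          obtain ⟨p1, p2⟩ := p
          simp only [Function.comp_apply]
          by_cases hpb : p1 = b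
          · have hp2 : p2 = l := hval (p1, p2) hp hpb
            subst hpb; subst hp2
            rw [if_pos (show (p1 == p1) = true by simp)]
            have hub : pvUpd a bs (p1, p2 ++ [a]) = (p1, p2 ++ [a]) := by
              simp only [pvUpd]
              rw [if_neg (by rintro ⟨_, _, h3⟩; exact h3 (by simp))]
            rw [hub]
            have : pvUpd a (p1 :: bs) (p1, p2) = (p1, p2 ++ [a]) := by
              simp only [pvUpd, List.mem_cons]
              rw [if_pos ⟨fun h => hba h.symm, by simp, hal⟩]
            rw [this]
          · rw [if_neg (by simpa using hpb)]
            exact (pvUpd_cons_of_ne a b bs (p1, p2) hpb).symm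
      · -- b fresh: a new entry (b, [a]) is appended
        have hcont' : d.contains b = false := by
          cases h : d.contains b with
          | false => rfl
          | true => exact absurd h hcont
        have hget : d.get? b = none := (PySem.Dict.get?_eq_none_iff_contains d b).mpr hcont'
        have hbkeys : b ∉ d.keys := fun h => by
          rw [(PySem.Dict.contains_iff_mem_keys d b).mpr h] at hcont'; simp at hcont'
        rw [hget]
        set d' := d.insert b [a] with hd'
        have hitems' : d'.items = d.items ++ [(b, [a])] :=
          PySem.Dict.items_insert_of_not_contains d _ hcont'
        have hkeys' : d'.keys = d.keys ++ [b] := PySem.Dict.keys_insert_of_not_contains d _ hcont'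
        have hnd' : d'.keys.Nodup := by
          rw [hkeys']
          exact List.Nodup.append hnd (by simp) (by simpa using fun h => hbkeys h)
        rw [ih d' hnd', hitems', hkeys']
        have hnews : pvNews a (b :: bs) d.keys = (b, [a]) :: pvNews a bs (d.keys ++ [b]) := by
          simp only [pvNews]
          rw [if_pos ⟨hba, hbkeys⟩]
        rw [hnews, List.map_append]
        have hub : pvUpd a bs (b, [a]) = (b, [a]) := by
          simp only [pvUpd]
          rw [if_neg (by rintro ⟨_, _, h3⟩; exact h3 (by simp))]
        have hmap : d.items.map (pvUpd a bs) = d.items.map (pvUpd a (b :: bs)) := by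
          apply List.map_congr_left
          intro p hp
          have hpb : p.1 ≠ b := fun h => hbkeys (h ▸ List.mem_map_of_mem (f := Prod.fst) hp)
          exact (pvUpd_cons_of_ne a b bs p hpb).symm
        simp only [List.map_cons, List.map_nil, hub, hmap, List.append_assoc, List.singleton_append]

-- A's whole second pass, at the items level
lemma pvA_outer : ∀ (ps : List (String × List String)) (d : PySem.Dict String (List String)),
    d.keys.Nodup →
    (ps.foldl (fun out p => p.2.foldl (pvStepA p.1) out) d).items = ps.foldl pvFitStep d.items := by
  intro ps
  induction ps with
  | nil => intro d _; simp
  | cons p ps ih =>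
    intro d hnd
    simp only [List.foldl_cons]
    set d' := p.2.foldl (pvStepA p.1) d with hd'
    have hitems' : d'.items = pvFitStep d.items p := by
      rw [hd', pvA_inner p.1 p.2 d hnd, pvFitStep]
      rfl
    have hkeys' : d'.keys.Nodup := by
      show (d'.items.map Prod.fst).Nodup
      rw [hitems', pvFitStep, List.map_append]
      have h1 : (d.items.map (pvUpd p.1 p.2)).map Prod.fst = d.items.map Prod.fst := by
        rw [List.map_map]; apply List.map_congr_left; intro q _; simp [pvUpd]
      rw [h1]
      exact List.Nodup.append hnd (pvNews_fst_nodup p.1 p.2 _)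
        (fun x hx => fun hx' => pvNews_fst_not_mem p.1 p.2 _ x hx' hx)
    rw [ih d' hkeys', hitems']

-- the pass in closed form: every existing entry grows, fresh entries are pvX
lemma pvFit_char : ∀ (ps : List (String × List String)) (out : List (String × List String)),
    ps.foldl pvFitStep out =
      out.map (fun q => (q.1, pvGrow ps q.1 q.2)) ++ pvX ps (out.map Prod.fst) := by
  intro ps
  induction ps with
  | nil => intro out; simp [pvGrow, pvX]
  | cons p ps ih =>
    intro out
    simp only [List.foldl_cons]
    rw [ih (pvFitStep out p)]
    simp only [pvFitStep, List.map_append, List.map_map]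
    have h1 : (out.map (Prod.fst ∘ pvUpd p.1 p.2)) = out.map Prod.fst := by
      apply List.map_congr_left; intro q _; simp [pvUpd]
    have h2 : out.map ((fun q => (q.1, pvGrow ps q.1 q.2)) ∘ pvUpd p.1 p.2) =
        out.map (fun q => (q.1, pvGrow (p :: ps) q.1 q.2)) := by
      apply List.map_congr_left; intro q _
      simp only [Function.comp_apply, pvUpd, pvGrow, List.foldl_cons]
      rfl
    rw [h1, h2, pvX, List.append_assoc]

lemma pvSrc_cons_pos (p : String × List String) (ps : List (String × List String)) (k : String)
    (h : p.1 ≠ k ∧ k ∈ p.2) : pvSrc (p :: ps) k = p.1 :: pvSrc ps k := by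
  simp [pvSrc, List.filter_cons, h]

lemma pvSrc_cons_neg (p : String × List String) (ps : List (String × List String)) (k : String)
    (h : ¬ (p.1 ≠ k ∧ k ∈ p.2)) : pvSrc (p :: ps) k = pvSrc ps k := by
  simp only [pvSrc, List.filter_cons]
  rw [if_neg (by simpa using h)]

-- growing a value = set-update with the sources
lemma pvGrow_eq_update (ps : List (String × List String)) (k : String) :
    ∀ (l : List String), pvGrow ps k l = PySem.Set.update l (pvSrc ps k) := by
  induction ps with
  | nil => intro l; simp [pvGrow, pvSrc, PySem.Set.update]
  | cons p ps ih =>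
    intro l
    by_cases hc : p.1 ≠ k ∧ k ∈ p.2
    · rw [pvSrc_cons_pos p ps k hc, PySem.Set.update_cons]
      have : pvGrow (p :: ps) k l = pvGrow ps k (PySem.Set.add l p.1) := by
        simp only [pvGrow, List.foldl_cons, PySem.Set.add_eq_ite]
        by_cases hm : p.1 ∈ l
        · rw [if_neg (by rintro ⟨_, _, h3⟩; exact h3 hm), if_pos hm]
        · rw [if_pos ⟨hc.1, hc.2, hm⟩, if_neg hm]
      rw [this, ih]
    · rw [pvSrc_cons_neg p ps k hc]
      have : pvGrow (p :: ps) k l = pvGrow ps k l := by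
        simp only [pvGrow, List.foldl_cons]
        rw [if_neg (by rintro ⟨h1, h2, _⟩; exact hc ⟨h1, h2⟩)]
      rw [this, ih]

-- dedup of a grown deduped value = dedup of base ++ sources
lemma pvVal_eq (ps : List (String × List String)) (k : String) (v : List String) :
    PySem.List.dedup (pvGrow ps k (PySem.List.dedup v)) = PySem.List.dedup (v ++ pvSrc ps k) := by
  rw [PySem.List.dedup_eq_ofList, PySem.List.dedup_eq_ofList, PySem.List.dedup_eq_ofList,
    pvGrow_eq_update, PySem.Set.ofList_append]
  exact PySem.Set.ofList_eq_self_of_nodup _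
    (PySem.Set.nodup_update _ _ (PySem.Set.nodup_ofList v))

-- the fresh entries, after the final dedup pass, carry exactly the deduped source lists
lemma pvX_dedup : ∀ (ps : List (String × List String)) (seen : List String),
    (pvX ps seen).map (fun q => (q.1, PySem.List.dedup q.2)) =
      (pvEK ps seen).map (fun b => (b, PySem.List.dedup (pvSrc ps b))) := by
  intro ps
  induction ps with
  | nil => intro seen; simp [pvX, pvEK]
  | cons p ps ih =>
    intro seen
    simp only [pvX, pvEK, List.map_append, List.map_map]
    congr 1
    · apply List.map_congr_left
      intro q hq
      obtain ⟨hq2, hqmem, hqne, _⟩ := pvNews_mem p.1 p.2 seen q hq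
      simp only [Function.comp_apply]
      have : PySem.List.dedup (pvGrow ps q.1 q.2) = PySem.List.dedup (q.2 ++ pvSrc ps q.1) := by
        have hded : PySem.List.dedup q.2 = q.2 := by
          rw [hq2, PySem.List.dedup_eq_ofList]
          exact PySem.Set.ofList_eq_self_of_nodup _ (by simp)
        conv_lhs => rw [← hded]
        exact pvVal_eq ps q.1 q.2
      rw [this, hq2]
      have : pvSrc (p :: ps) q.1 = p.1 :: pvSrc ps q.1 := by
        exact pvSrc_cons_pos p ps q.1 ⟨fun h => hqne h.symm, hqmem⟩
      rw [this]
      rfl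
    · rw [ih]
      apply List.map_congr_left
      intro b hb
      have hnot : b ∉ seen ++ (pvNews p.1 p.2 seen).map Prod.fst := pvEK_not_mem_seen ps _ b hb
      have : pvSrc (p :: ps) b = pvSrc ps b := by
        apply pvSrc_cons_neg
        rintro ⟨h1, h2⟩
        rcases pvNews_covers p.1 p.2 seen b h2 (fun h => h1 h.symm) with h | h
        · exact hnot (List.mem_append.mpr (Or.inl h))
        · exact hnot (List.mem_append.mpr (Or.inr h))
      rw [this]

-- B's seen/extra collection over one pair, in terms of pvNews
lemma pvB_inner (a : String) : ∀ (bs : List String) (s : PySem.Set String) (e : List String),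
    bs.foldl
      (fun st b =>
        if b ≠ a ∧ ¬ (PySem.Set.contains st.1 b) then (PySem.Set.add st.1 b, st.2 ++ [b]) else st)
      (s, e) =
    (s ++ (pvNews a bs s).map Prod.fst, e ++ (pvNews a bs s).map Prod.fst) := by
  intro bs
  induction bs with
  | nil => intro s e; simp [pvNews]
  | cons b bs ih =>
    intro s e
    simp only [List.foldl_cons]
    by_cases hc : b ≠ a ∧ b ∉ s
    · have hcond : b ≠ a ∧ ¬ (PySem.Set.contains (α := String) s b) = true := by
        refine ⟨hc.1, ?_⟩
        rw [PySem.Set.contains_eq_listContains]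
        simpa using hc.2
      rw [if_pos hcond, PySem.Set.add_of_not_mem hc.2, ih]
      simp only [pvNews, if_pos hc, List.map_cons]
      simp [List.append_assoc]
    · have hcond : ¬ (b ≠ a ∧ ¬ (PySem.Set.contains (α := String) s b) = true) := by
        rintro ⟨h1, h2⟩
        apply hc
        refine ⟨h1, fun hm => h2 ?_⟩
        rw [PySem.Set.contains_eq_listContains]
        simpa using hm
      rw [if_neg hcond, ih]
      simp only [pvNews, if_neg hc]

-- B's whole seen/extra collection, in terms of pvEK
lemma pvB_outer : ∀ (ps : List (String × List String)) (s : PySem.Set String) (e : List String),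
    ps.foldl
      (fun st p =>
        p.2.foldl
          (fun st b =>
            if b ≠ p.1 ∧ ¬ (PySem.Set.contains st.1 b) then (PySem.Set.add st.1 b, st.2 ++ [b])
            else st)
          st)
      (s, e) =
    (s ++ pvEK ps s, e ++ pvEK ps s) := by
  intro ps
  induction ps with
  | nil => intro s e; simp [pvEK]
  | cons p ps ih =>
    intro s e
    simp only [List.foldl_cons]
    rw [pvB_inner p.1 p.2 s e, ih, pvEK]
    simp [List.append_assoc]

-- one pair's contribution to B's reverse index, looked up at k
lemma pvRev_inner (a k : String) : ∀ (bs : List String), bs.Nodup →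
    ∀ (d : PySem.Dict String (List String)),
    (bs.foldl (fun d b => if b ≠ a then d.modify b [] (· ++ [a]) else d) d).getD k [] =
      d.getD k [] ++ (if k ∈ bs ∧ k ≠ a then [a] else []) := by
  intro bs
  induction bs with
  | nil => intro _ d; simp
  | cons b bs ih =>
    intro hnd d
    simp only [List.foldl_cons]
    by_cases hba : b ≠ a
    · rw [if_pos hba, ih hnd.of_cons]
      rw [PySem.Dict.getD_modify]
      by_cases hkb : k = b
      · subst hkb
        have hknb : k ∉ bs := (List.nodup_cons.mp hnd).1
        rw [if_pos rfl, if_neg (by rintro ⟨h, _⟩; exact hknb h),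
          if_pos ⟨List.mem_cons_self, hba⟩, List.append_nil]
      · rw [if_neg hkb]
        congr 1
        by_cases hk : k ∈ bs ∧ k ≠ a
        · rw [if_pos hk, if_pos ⟨List.mem_cons_of_mem b hk.1, hk.2⟩]
        · rw [if_neg hk, if_neg (by rintro ⟨h1, h2⟩; exact hk ⟨(List.mem_cons.mp h1).resolve_left hkb, h2⟩)]
    · rw [if_neg hba, ih hnd.of_cons]
      rw [not_ne_iff] at hba
      congr 1
      by_cases hk : k ∈ bs ∧ k ≠ a
      · rw [if_pos hk, if_pos ⟨List.mem_cons_of_mem b hk.1, hk.2⟩]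
      · rw [if_neg hk, if_neg (by rintro ⟨h1, h2⟩; exact hk ⟨(List.mem_cons.mp h1).resolve_left (fun h => h2 (h.trans hba)), h2⟩)]

-- B's whole reverse index, looked up at k, lists exactly the sources of k in order
lemma pvRev_outer (k : String) : ∀ (ps : List (String × List String))
    (d : PySem.Dict String (List String)),
    (ps.foldl
        (fun d p =>
          (PySem.List.dedup p.2).foldl
            (fun d b => if b ≠ p.1 then d.modify b [] (· ++ [p.1]) else d) d)
        d).getD k [] =
      d.getD k [] ++ pvSrc ps k := by
  intro ps
  induction ps with
  | nil => intro d; simp [pvSrc]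
  | cons p ps ih =>
    intro d
    simp only [List.foldl_cons]
    rw [ih, pvRev_inner p.1 k (PySem.List.dedup p.2) (PySem.List.nodup_dedup p.2)]
    by_cases hc : p.1 ≠ k ∧ k ∈ p.2
    · rw [pvSrc_cons_pos p ps k hc,
        if_pos ⟨(PySem.List.mem_dedup p.2 k).mpr hc.2, fun h => hc.1 h.symm⟩]
      simp [List.append_assoc]
    · rw [pvSrc_cons_neg p ps k hc,
        if_neg (by rintro ⟨h1, h2⟩; exact hc ⟨fun h => h2 h.symm, (PySem.List.mem_dedup p.2 k).mp h1⟩)]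
      simp

-- ===== VERDICT (by name: the statement is the Claim_ definition above) =====
theorem make_confusion_symmetric_spec : Claim_equal_make_confusion_symmetric := by
  intro cm _ hpre
  unfold Spec_make_confusion_symmetric
  unfold Pre_make_confusion_symmetric at hpre
  unfold make_confusion_symmetric make_confusion_symmetric_alt
  simp only []
  -- A side: phase 1 builds the deduped base dict
  have h0 : (cm.foldl (fun d p => d.insert p.1 (PySem.List.dedup p.2))
      (PySem.Dict.empty : PySem.Dict String (List String))).items
      = cm.map (fun p => (p.1, PySem.List.dedup p.2)) := by
    have := PySem.Dict.items_foldl_insert_fresh cm Prod.fst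
      (fun p => PySem.List.dedup p.2) (PySem.Dict.empty : PySem.Dict String (List String))
      (fun p _ => by simp [PySem.Dict.contains_empty]) hpre
    simpa using this
  set out0 := cm.foldl (fun d p => d.insert p.1 (PySem.List.dedup p.2))
      (PySem.Dict.empty : PySem.Dict String (List String)) with hout0
  have hkeys0 : out0.keys = cm.map Prod.fst := by
    show out0.items.map Prod.fst = _
    rw [h0, List.map_map]
    rfl
  have hnd0 : out0.keys.Nodup := by rw [hkeys0]; exact hpre
  -- A side: phase 2 via the items-level characterization
  rw [pvA_outer cm out0 hnd0, pvFit_char, h0]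
  have hkeysmap : (cm.map (fun p => (p.1, PySem.List.dedup p.2))).map Prod.fst = cm.map Prod.fst := by
    rw [List.map_map]; rfl
  rw [hkeysmap, List.map_append, List.map_map, pvX_dedup]
  -- B side
  rw [pvB_outer cm (PySem.Set.ofList (cm.map Prod.fst)) [],
    PySem.Set.ofList_eq_self_of_nodup _ hpre]
  simp only [List.nil_append, List.map_append]
  congr 1
  · -- entries for the original keys
    simp only [List.map_map]
    apply List.map_congr_left
    intro p hp
    simp only [Function.comp_apply]
    have hbase : (PySem.Dict.mk cm).getD p.1 [] = p.2 :=
      PySem.Dict.getD_of_mem_items (PySem.Dict.mk cm) (k := p.1) (v := p.2) hp hpre []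
    rw [hbase, pvRev_outer, PySem.Dict.getD_empty, List.nil_append, pvVal_eq]
  · -- entries for the fresh target-only keys
    apply List.map_congr_left
    intro b hb
    have hbk : b ∉ cm.map Prod.fst := pvEK_not_mem_seen cm _ b hb
    have hcont : (PySem.Dict.mk cm).contains b = false := by
      cases h : (PySem.Dict.mk cm).contains b with
      | false => rfl
      | true =>
        exact absurd ((PySem.Dict.contains_iff_mem_keys _ b).mp h) hbk
    rw [PySem.Dict.getD_of_not_contains _ _ hcont, pvRev_outer, PySem.Dict.getD_empty]
    simp
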